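-- pv_equiv track=rewrite | github.com/xieswufe/InternShip | FaceBook/Untagged/最大的01矩阵.py | max_01_matrix
-- ===== SOURCE A (Python) =====
-- def max_01_matrix(matrix):
--     if not matrix or not matrix[0]:
--         return 0
--
--     dp = [[1] * len(matrix[0]) for _ in range(len(matrix))]
--     result = 1
--     for i in range(1, len(dp)):
--         for j in range(1, len(dp[0])):
--             if matrix[i][j] == matrix[i - 1][j - 1] and \
--                 matrix[i][j] != matrix[i - 1][j] and \
--                 matrix[i][j] != matrix[i][j - 1]:
--                 dp[i][j] = min(dp[i - 1][j - 1], min(dp[i - 1][j], dp[i][j - 1])) + 1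
--                 result = max(result, dp[i][j])
--     return result
-- ===== SOURCE B (Python) =====
-- def max_01_matrix(matrix):
--     if not matrix or not matrix[0]:
--         return 0
--     cols = len(matrix[0])
--
--     def ok(p, q):
--         return (matrix[p][q] == matrix[p - 1][q - 1]
--                 and matrix[p][q] != matrix[p - 1][q]
--                 and matrix[p][q] != matrix[p][q - 1])
--
--     def ring_ok(i, j, k):
--         # border cells added when the square with bottom-right (i, j) grows from size k to k+1
--         if i - k < 0 or j - k < 0:
--             return False
--         if not all(ok(i - k + 1, q) for q in range(j - k + 1, j + 1)):
--             return False
--         return all(ok(p, j - k + 1) for p in range(i - k + 2, i + 1))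
--
--     best = 1
--     for i in range(len(matrix)):
--         for j in range(cols):
--             k = 1
--             while ring_ok(i, j, k):
--                 k += 1
--             if k > best:
--                 best = k
--     return best
-- ===== Notes on version B (the rewrite author's own statement) =====
-- stated objective: alternative
-- what changed: Replaces A's bottom-up DP table (min of three neighbours + 1, single pass) with a per-cell expanding-square search: for each cell as bottom-right corner, grow the candidate checkerboard square one ring at a time, re-checking the local relation on the newly added border cells, and track the global maximum.
import Mathlib
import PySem

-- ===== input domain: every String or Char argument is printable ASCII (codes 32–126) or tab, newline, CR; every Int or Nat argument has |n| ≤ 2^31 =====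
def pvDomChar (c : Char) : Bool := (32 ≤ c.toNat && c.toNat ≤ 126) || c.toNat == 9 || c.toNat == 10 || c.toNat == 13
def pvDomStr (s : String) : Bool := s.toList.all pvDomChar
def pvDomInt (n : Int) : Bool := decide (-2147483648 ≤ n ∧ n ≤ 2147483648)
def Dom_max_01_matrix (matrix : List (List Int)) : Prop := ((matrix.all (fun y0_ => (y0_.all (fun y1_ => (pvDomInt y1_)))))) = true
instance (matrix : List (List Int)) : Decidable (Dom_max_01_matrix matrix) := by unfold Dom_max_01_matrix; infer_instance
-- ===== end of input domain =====

-- B replaces A's bottom-up DP table with a per-cell expanding-square search (same return value; not faster).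

-- matrix[i][j] for indices the loops keep in range (total form; Pre_ excludes the raising inputs)
def mget (m : List (List Int)) (i j : Int) : Int :=
  PySem.List.pyGetD (PySem.List.pyGetD m i []) j 0

-- ===== PORT A =====
def max_01_matrix (matrix : List (List Int)) : Int :=
  if matrix.length = 0 ∨ (PySem.List.pyGetD matrix 0 []).length = 0 then 0
  else
    -- dp = [[1] * len(matrix[0]) for _ in range(len(matrix))]
    let dp0 : List (List Int) :=
      List.replicate matrix.length (List.replicate (PySem.List.pyGetD matrix 0 []).length (1 : Int))
    let final :=
      (PySem.List.pyRange 1 (PySem.List.len dp0) 1).foldl (fun st i =>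
        (PySem.List.pyRange 1 (PySem.List.len (PySem.List.pyGetD st.1 0 [])) 1).foldl
          (fun (st : List (List Int) × Int) j =>
            if mget matrix i j == mget matrix (i-1) (j-1)
                && !(mget matrix i j == mget matrix (i-1) j)
                && !(mget matrix i j == mget matrix i (j-1)) then
              let v := min (mget st.1 (i-1) (j-1)) (min (mget st.1 (i-1) j) (mget st.1 i (j-1))) + 1
              (PySem.List.pySetD st.1 i (PySem.List.pySetD (PySem.List.pyGetD st.1 i []) j v),
               max st.2 v)
            else st) st)
        (dp0, (1 : Int))
    final.2

-- ===== PORT B =====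
def okB (matrix : List (List Int)) (p q : Int) : Bool :=
  mget matrix p q == mget matrix (p-1) (q-1)
  && !(mget matrix p q == mget matrix (p-1) q)
  && !(mget matrix p q == mget matrix p (q-1))

-- border cells added when the square with bottom-right (i, j) grows from size k to k+1
def ringOk (matrix : List (List Int)) (i j k : Int) : Bool :=
  if i - k < 0 || j - k < 0 then false
  else if !((PySem.List.pyRange (j-k+1) (j+1) 1).all (fun q => okB matrix (i-k+1) q)) then false
  else (PySem.List.pyRange (i-k+2) (i+1) 1).all (fun p => okB matrix p (j-k+1))

-- the 'while ring_ok: k += 1' loop; fuel (min i j).toNat + 1 always suffices since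
-- ringOk fails as soon as min i j < k
def growB (matrix : List (List Int)) (i j : Int) : Nat → Int → Int
  | 0, k => k
  | fuel+1, k => if ringOk matrix i j k then growB matrix i j fuel (k+1) else k

def max_01_matrix_alt (matrix : List (List Int)) : Int :=
  if matrix.length = 0 ∨ (PySem.List.pyGetD matrix 0 []).length = 0 then 0
  else
    (PySem.List.pyRange 0 (PySem.List.len matrix) 1).foldl (fun best i =>
      (PySem.List.pyRange 0 (PySem.List.len (PySem.List.pyGetD matrix 0 [])) 1).foldl (fun best j =>
        let k := growB matrix i j ((min i j).toNat + 1) 1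
        if best < k then k else best) best) 1

-- ===== PRECONDITION & SPEC =====
-- Pre_ excludes exactly the inputs where A raises IndexError: a matrix with at least two rows and
-- at least two columns in row 0 in which some row is shorter than row 0 (ragged input).
def Pre_max_01_matrix (matrix : List (List Int)) : Prop :=
  matrix.length ≤ 1 ∨ (matrix.headD []).length ≤ 1 ∨
    ∀ row ∈ matrix, (matrix.headD []).length ≤ row.length
instance (matrix : List (List Int)) : Decidable (Pre_max_01_matrix matrix) := by
  unfold Pre_max_01_matrix; infer_instance

def pvWitness_max_01_matrix : List (List Int) := [[0, 1], [1, 0]]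

def Spec_max_01_matrix (matrix : List (List Int)) (out : Int) : Prop := out = max_01_matrix_alt matrix
instance (matrix : List (List Int)) (out : Int) : Decidable (Spec_max_01_matrix matrix out) := by unfold Spec_max_01_matrix; infer_instance

-- ===== CLAIM (what is proved, stated in full; the proofs are below) =====
def Claim_equal_max_01_matrix : Prop := ∀ (matrix : List (List Int)), Dom_max_01_matrix matrix → Pre_max_01_matrix matrix → Spec_max_01_matrix matrix (max_01_matrix matrix)

-- ===== LEMMAS AND PROOFS =====

-- the DP value of A at cell (i, j) (specification function, proof side only)
def val (m : List (List Int)) : Nat → Nat → Int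
  | 0, _ => 1
  | _+1, 0 => 1
  | i+1, j+1 =>
      if okB m ((i : Int)+1) ((j : Int)+1) then
        min (val m i j) (min (val m i (j+1)) (val m (i+1) j)) + 1
      else 1
  termination_by i j => (i, j)

-- 'the k×k square with bottom-right (i, j) is a valid checkerboard candidate':
-- it fits, and every cell of it except the top row and left column satisfies the local relation
def Valid (m : List (List Int)) (i j k : Int) : Prop :=
  k ≤ min i j + 1 ∧
    ∀ p q : Int, i - k + 2 ≤ p → p ≤ i → j - k + 2 ≤ q → q ≤ j → okB m p q = true

theorem one_le_val (m : List (List Int)) (i j : Nat) : 1 ≤ val m i j := by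
  induction i, j using val.induct m with
  | _ => simp only [val]; try split_ifs
         all_goals omega


theorem val_zero_left (m : List (List Int)) (j : Nat) : val m 0 j = 1 := by
  simp [val]


theorem val_zero_right (m : List (List Int)) (i : Nat) : val m i 0 = 1 := by
  cases i <;> simp [val]


theorem Valid_mono (m : List (List Int)) (i j k k' : Int) (_h1 : 1 ≤ k') (h2 : k' ≤ k)
    (h : Valid m i j k) : Valid m i j k' := by
  unfold Valid at h ⊢
  obtain ⟨hb, hc⟩ := h
  exact ⟨by omega, fun p q a1 a2 a3 a4 => hc p q (by omega) a2 (by omega) a4⟩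


theorem Valid_one (m : List (List Int)) (i j : Int) (hi : 0 ≤ i) (hj : 0 ≤ j) :
    Valid m i j 1 := by
  unfold Valid
  exact ⟨by omega, fun p q a1 a2 a3 a4 => by omega⟩


theorem Valid_succ_iff (m : List (List Int)) (i j k : Int) (hi : 1 ≤ i) (hj : 1 ≤ j) (hk : 1 ≤ k) :
    Valid m i j (k+1) ↔
      okB m i j = true ∧ Valid m (i-1) (j-1) k ∧ Valid m (i-1) j k ∧ Valid m i (j-1) k := by
  unfold Valid
  constructor
  · rintro ⟨hb, hc⟩
    refine ⟨hc i j (by omega) (by omega) (by omega) (by omega), ⟨by omega, ?_⟩,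
      ⟨by omega, ?_⟩, ⟨by omega, ?_⟩⟩ <;>
      exact fun p q a1 a2 a3 a4 => hc p q (by omega) (by omega) (by omega) (by omega)
  · rintro ⟨hok, ⟨b1, c1⟩, ⟨b2, c2⟩, ⟨b3, c3⟩⟩
    refine ⟨by omega, fun p q a1 a2 a3 a4 => ?_⟩
    by_cases hp : p = i <;> by_cases hq : q = j
    · subst hp; subst hq; exact hok
    · exact c3 p q (by omega) (by omega) (by omega) (by omega)
    · exact c2 p q (by omega) (by omega) (by omega) (by omega)
    · exact c1 p q (by omega) (by omega) (by omega) (by omega)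

theorem val_spec (m : List (List Int)) (i j : Nat) :
    Valid m i j (val m i j) ∧ ¬ Valid m i j (val m i j + 1) := by
  induction i, j using val.induct m with
  | case1 j =>
    rw [val_zero_left]
    exact ⟨Valid_one m _ _ (by omega) (by omega), fun h => by have := h.1; omega⟩
  | case2 i =>
    rw [val_zero_right]
    exact ⟨Valid_one m _ _ (by omega) (by omega), fun h => by have := h.1; omega⟩
  | case3 i j hok ihd ihm ihl =>
    push_cast at ihd ihm ihl ⊢
    have e1 : (i:Int) + 1 - 1 = (i:Int) := by ring
    have e2 : (j:Int) + 1 - 1 = (j:Int) := by ring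
    have ha := one_le_val m i j
    have hb := one_le_val m i (j+1)
    have hc := one_le_val m (i+1) j
    have hv : val m (i+1) (j+1) = min (val m i j) (min (val m i (j+1)) (val m (i+1) j)) + 1 := by
      rw [val]; simp [hok]
    rw [hv]
    set a := val m i j with hA
    set b := val m i (j+1) with hB
    set c := val m (i+1) j with hC
    set μ := min a (min b c) with hμ
    constructor
    · refine (Valid_succ_iff m _ _ μ (by omega) (by omega) (by omega)).mpr ⟨hok, ?_, ?_, ?_⟩
      · rw [e1, e2]; exact Valid_mono m _ _ a μ (by omega) (by omega) ihd.1
      · rw [e1]; exact Valid_mono m _ _ b μ (by omega) (by omega) ihm.1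
      · rw [e2]; exact Valid_mono m _ _ c μ (by omega) (by omega) ihl.1
    · intro hV
      have h2 := (Valid_succ_iff m _ _ (μ+1) (by omega) (by omega) (by omega)).mp hV
      rw [e1, e2] at h2
      obtain ⟨-, hd, hmm, hll⟩ := h2
      have hcase : μ = a ∨ μ = b ∨ μ = c := by omega
      rcases hcase with h|h|h
      · exact ihd.2 (h ▸ hd)
      · exact ihm.2 (h ▸ hmm)
      · exact ihl.2 (h ▸ hll)
  | case4 i j hok =>
    push_cast at ⊢
    have hv : val m (i+1) (j+1) = 1 := by rw [val]; simp [hok]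
    rw [hv]
    refine ⟨Valid_one m _ _ (by omega) (by omega), fun hV => ?_⟩
    have h2 := (Valid_succ_iff m _ _ 1 (by omega) (by omega) (by omega)).mp hV
    exact hok h2.1

theorem valid_unique (m : List (List Int)) (i j a b : Int) (ha1 : 1 ≤ a) (hb1 : 1 ≤ b)
    (ha : Valid m i j a ∧ ¬ Valid m i j (a+1)) (hb : Valid m i j b ∧ ¬ Valid m i j (b+1)) :
    a = b := by
  rcases lt_trichotomy a b with h|h|h
  · exact absurd (Valid_mono m i j b (a+1) (by omega) (by omega) hb.1) ha.2
  · exact h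
  · exact absurd (Valid_mono m i j a (b+1) (by omega) (by omega) ha.1) hb.2

theorem ringOk_false_of_lt (m : List (List Int)) (i j k : Int) (h : min i j < k) :
    ringOk m i j k = false := by
  simp only [ringOk]
  split_ifs with h1 h2
  · rfl
  · rfl
  · exfalso; simp only [Bool.or_eq_true, decide_eq_true_eq] at h1; omega

-- ring step: growing a valid square of size k by its ring gives a valid square of size k+1
theorem Valid_succ_ring (m : List (List Int)) (i j k : Int) (_hi : 0 ≤ i) (_hj : 0 ≤ j) (hk : 1 ≤ k) :
    Valid m i j (k+1) ↔ Valid m i j k ∧ ringOk m i j k = true := by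
  constructor
  · rintro ⟨hb, hcells⟩
    refine ⟨⟨by omega, fun p q a1 a2 a3 a4 => hcells p q (by omega) a2 (by omega) a4⟩, ?_⟩
    have hA : (PySem.List.pyRange (j-k+1) (j+1) 1).all (fun q => okB m (i-k+1) q) = true := by
      rw [List.all_eq_true]; intro q hq
      rw [PySem.List.mem_pyRange_one] at hq
      exact hcells _ _ (by omega) (by omega) (by omega) (by omega)
    have hB : (PySem.List.pyRange (i-k+2) (i+1) 1).all (fun p => okB m p (j-k+1)) = true := by
      rw [List.all_eq_true]; intro p hp
      rw [PySem.List.mem_pyRange_one] at hp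
      exact hcells _ _ (by omega) (by omega) (by omega) (by omega)
    simp [ringOk, hA, hB]
    omega
  · rintro ⟨⟨hb, hcells⟩, hr⟩
    simp only [ringOk] at hr
    split_ifs at hr with h1 h2
    simp only [Bool.or_eq_true, decide_eq_true_eq, not_or, not_lt] at h1
    simp only [Bool.not_eq_true', Bool.not_eq_false, List.all_eq_true] at h2
    rw [List.all_eq_true] at hr
    refine ⟨by omega, fun p q a1 a2 a3 a4 => ?_⟩
    by_cases hp : p = i - k + 1
    · subst hp
      exact h2 q (by rw [PySem.List.mem_pyRange_one]; omega)
    · by_cases hq : q = j - k + 1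
      · subst hq
        exact hr p (by rw [PySem.List.mem_pyRange_one]; omega)
      · exact hcells p q (by omega) a2 (by omega) a4

theorem grow_spec (m : List (List Int)) (i j : Int) : ∀ (fuel : Nat) (k : Int),
    ringOk m i j (k + fuel) = false →
    k ≤ growB m i j fuel k ∧
      (∀ t, k ≤ t → t < growB m i j fuel k → ringOk m i j t = true) ∧
      ringOk m i j (growB m i j fuel k) = false := by
  intro fuel
  induction fuel with
  | zero =>
    intro k h
    push_cast at h
    simp only [growB]
    exact ⟨le_refl k, fun t h1 h2 => absurd h2 (by omega), by simpa using h⟩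
  | succ f ih =>
    intro k h
    rw [growB]
    by_cases hr : ringOk m i j k = true
    · rw [if_pos hr]
      have h' : ringOk m i j (k + 1 + (f:Int)) = false := by
        have e : k + 1 + (f:Int) = k + ((f+1:Nat):Int) := by push_cast; ring
        rw [e]; exact h
      obtain ⟨g1, g2, g3⟩ := ih (k+1) h'
      refine ⟨by omega, fun t ht1 ht2 => ?_, g3⟩
      by_cases hteq : t = k
      · rw [hteq]; exact hr
      · exact g2 t (by omega) ht2
    · rw [if_neg hr]
      have hF : ringOk m i j k = false := by revert hr; cases (ringOk m i j k) <;> simp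
      exact ⟨le_refl k, fun t h1 h2 => by omega, hF⟩

theorem grow_eq_val (m : List (List Int)) (i j : Int) (hi : 0 ≤ i) (hj : 0 ≤ j) :
    growB m i j ((min i j).toNat + 1) 1 = val m i.toNat j.toNat := by
  set F := (min i j).toNat + 1 with hF
  have hfail : ringOk m i j (1 + (F:Int)) = false :=
    ringOk_false_of_lt m i j _ (by omega)
  obtain ⟨g1, g2, g3⟩ := grow_spec m i j F 1 hfail
  set g := growB m i j F 1 with hg
  have hval : ∀ n : Nat, 1 + (n:Int) ≤ g → Valid m i j (1 + n) := by
    intro n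
    induction n with
    | zero => intro _; simpa using Valid_one m i j hi hj
    | succ t ih =>
      intro hle
      push_cast at hle
      have hv := ih (by omega)
      have hr : ringOk m i j (1+t) = true := g2 (1+(t:Int)) (by omega) (by omega)
      have hstep := (Valid_succ_ring m i j (1+(t:Int)) hi hj (by omega)).mpr ⟨hv, hr⟩
      have e : (1:Int) + ((t+1:Nat):Int) = (1+(t:Int))+1 := by push_cast; ring
      rw [e]; exact hstep
  have hVg : Valid m i j g := by
    have e : g = 1 + ((g-1).toNat : Int) := by omega
    rw [e]; exact hval _ (by omega)
  have hnVg : ¬ Valid m i j (g+1) := by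
    intro hV
    have hstep := (Valid_succ_ring m i j g hi hj (by omega)).mp hV
    rw [hstep.2] at g3; cases g3
  have hvs := val_spec m i.toNat j.toNat
  rw [Int.toNat_of_nonneg hi, Int.toNat_of_nonneg hj] at hvs
  exact valid_unique m i j g (val m i.toNat j.toNat) (by omega) (one_le_val m _ _) ⟨hVg, hnVg⟩ hvs

-- the dp table of A after all cells row-major before (i, j) have been processed
def specDp (m : List (List Int)) (n cols : Nat) (i j : Int) : List (List Int) :=
  (List.range n).map (fun (p : Nat) => (List.range cols).map (fun (q : Nat) =>
    if (p:Int) < i ∨ ((p:Int) = i ∧ (q:Int) < j) then val m p q else 1))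

theorem mget_specDp (m : List (List Int)) (n cols : Nat) (i j : Int) (p q : Int)
    (hp : 0 ≤ p) (hpn : p < (n:Int)) (hq : 0 ≤ q) (hqc : q < (cols:Int)) :
    mget (specDp m n cols i j) p q
      = if p < i ∨ (p = i ∧ q < j) then val m p.toNat q.toNat else 1 := by
  obtain ⟨pn, rfl⟩ : ∃ pn : Nat, p = (pn:Int) := ⟨p.toNat, (Int.toNat_of_nonneg hp).symm⟩
  obtain ⟨qn, rfl⟩ : ∃ qn : Nat, q = (qn:Int) := ⟨q.toNat, (Int.toNat_of_nonneg hq).symm⟩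
  unfold mget specDp
  simp only [PySem.List.pyGetD_natCast, Int.toNat_natCast]
  have hrow : ∀ (F : Nat → List Int), (List.map F (List.range n)).getD pn [] = F pn := by
    intro F
    rw [List.getD_eq_getElem _ _ (by simpa using hpn)]
    simp
  rw [hrow]
  rw [List.getD_eq_getElem _ _ (by simpa using hqc)]
  simp only [List.getElem_map, List.getElem_range]

theorem val_succ_ok (m : List (List Int)) (i j : Int) (hi : 1 ≤ i) (hj : 1 ≤ j)
    (hok : okB m i j = true) :
    val m i.toNat j.toNat
      = min (val m (i-1).toNat (j-1).toNat)
          (min (val m (i-1).toNat j.toNat) (val m i.toNat (j-1).toNat)) + 1 := by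
  have e1 : i.toNat = (i-1).toNat + 1 := by omega
  have e2 : j.toNat = (j-1).toNat + 1 := by omega
  have hok' : okB m (((i-1).toNat : Int) + 1) (((j-1).toNat : Int) + 1) = true := by
    have : ((i-1).toNat : Int) + 1 = i := by omega
    have h2 : ((j-1).toNat : Int) + 1 = j := by omega
    rw [this, h2]; exact hok
  rw [e1, e2, val, if_pos hok']

theorem val_succ_notok (m : List (List Int)) (i j : Int) (hi : 1 ≤ i) (hj : 1 ≤ j)
    (hok : ¬ okB m i j = true) :
    val m i.toNat j.toNat = 1 := by
  have e1 : i.toNat = (i-1).toNat + 1 := by omega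
  have e2 : j.toNat = (j-1).toNat + 1 := by omega
  have hok' : ¬ okB m (((i-1).toNat : Int) + 1) (((j-1).toNat : Int) + 1) = true := by
    have h1 : ((i-1).toNat : Int) + 1 = i := by omega
    have h2 : ((j-1).toNat : Int) + 1 = j := by omega
    rw [h1, h2]; exact hok
  rw [e1, e2, val, if_neg hok']

-- generic invariant for A's (table, running max) fold over a range
theorem foldl_table (step : (List (List Int) × Int) → Int → (List (List Int) × Int))
    (T : Int → List (List Int)) (G : Int → Int → Int) (lo hi : Int)
    (hstep : ∀ q r, lo ≤ q → q < hi → 1 ≤ r → step (T q, r) q = (T (q+1), G q r))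
    (hG : ∀ q r, lo ≤ q → q < hi → 1 ≤ r → 1 ≤ G q r) :
    ∀ (q r : Int), lo ≤ q → q ≤ hi → 1 ≤ r →
      (PySem.List.pyRange q hi 1).foldl step (T q, r)
        = (T hi, (PySem.List.pyRange q hi 1).foldl (fun r x => G x r) r) := by
  intro q r hq1 hq2 hr
  induction hn : (hi - q).toNat generalizing q r with
  | zero =>
    have : q = hi := by omega
    subst this
    rw [PySem.List.pyRange_one_eq_nil (by omega)]
    simp
  | succ nn ih =>
    have hqlt : q < hi := by omega
    rw [PySem.List.pyRange_one_cons hqlt]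
    simp only [List.foldl_cons]
    rw [hstep q r hq1 hqlt hr]
    exact ih (q+1) (G q r) (by omega) (by omega) (hG q r hq1 hqlt hr) (by omega)

theorem le_foldl_maxV (V : Int → Int) (l : List Int) :
    ∀ r : Int, r ≤ l.foldl (fun r x => max r (V x)) r := by
  induction l with
  | nil => intro r; simp
  | cons a t ih =>
    intro r
    simp only [List.foldl_cons]
    exact le_trans (le_max_left r (V a)) (ih (max r (V a)))

theorem foldl_max_absorb (V : Int → Int) (l : List Int) :
    ∀ r : Int, (∀ x ∈ l, V x ≤ r) → l.foldl (fun r x => max r (V x)) r = r := by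
  induction l with
  | nil => intro r _; rfl
  | cons a t ih =>
    intro r h
    simp only [List.foldl_cons]
    have ha : max r (V a) = r := max_eq_left (h a (by simp))
    rw [ha]
    exact ih r (fun x hx => h x (by simp [hx]))

theorem row_len_specDp (m : List (List Int)) (n cols : Nat) (i j : Int) (hn : 0 < n) :
    (PySem.List.pyGetD (specDp m n cols i j) 0 []).length = cols := by
  unfold specDp
  rw [PySem.List.pyGetD_zero, List.getD_eq_getElem _ _ (by simpa using hn)]
  simp

theorem specDp_init (m : List (List Int)) (n cols : Nat) :
    List.replicate n (List.replicate cols (1:Int)) = specDp m n cols 1 1 := by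
  apply List.ext_getElem (by simp [specDp])
  intro r h1 h2
  unfold specDp
  simp only [List.getElem_replicate, List.getElem_map, List.getElem_range]
  apply List.ext_getElem (by simp)
  intro c hh1 hh2
  simp only [List.getElem_replicate, List.getElem_map, List.getElem_range]
  split_ifs with h
  · rcases h with h | ⟨h, hc⟩
    · have hr0 : r = 0 := by omega
      subst hr0; rw [val_zero_left]
    · have hc0 : c = 0 := by omega
      subst hc0; rw [val_zero_right]
  · rfl

theorem specDp_shift (m : List (List Int)) (n cols : Nat) (i : Int) :
    specDp m n cols i (cols:Int) = specDp m n cols (i+1) 1 := by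
  unfold specDp
  apply List.ext_getElem (by simp)
  intro r h1 h2
  simp only [List.getElem_map, List.getElem_range]
  apply List.ext_getElem (by simp)
  intro c hc1 hc2
  have hc : c < cols := by simpa using hc1
  simp only [List.getElem_map, List.getElem_range]
  split_ifs with hA hB hB
  · rfl
  · exfalso; omega
  · rcases hB with h'' | ⟨hr, hcc⟩
    · exfalso; omega
    · have hc0 : c = 0 := by omega
      subst hc0; rw [val_zero_right]
  · rfl

theorem specDp_skip (m : List (List Int)) (n cols : Nat) (i j : Int)
    (hi : 1 ≤ i) (hj : 1 ≤ j) (hok : ¬ okB m i j = true) :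
    specDp m n cols i (j+1) = specDp m n cols i j := by
  unfold specDp
  apply List.ext_getElem (by simp)
  intro r h1 h2
  simp only [List.getElem_map, List.getElem_range]
  apply List.ext_getElem (by simp)
  intro c hc1 hc2
  simp only [List.getElem_map, List.getElem_range]
  split_ifs with hA hB hB
  · rfl
  · have hr : (r:Int) = i := by omega
    have hcj : (c:Int) = j := by omega
    have h1' : r = i.toNat := by omega
    have h2' : c = j.toNat := by omega
    subst h1'; subst h2'
    rw [val_succ_notok m i j hi hj hok]
  · exfalso; omega
  · rfl

theorem specDp_update (m : List (List Int)) (n cols : Nat) (i j : Int)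
    (hi : 1 ≤ i) (hin : i < (n:Int)) (hj : 1 ≤ j) (hjc : j < (cols:Int)) :
    PySem.List.pySetD (specDp m n cols i j) i
      (PySem.List.pySetD (PySem.List.pyGetD (specDp m n cols i j) i []) j (val m i.toNat j.toNat))
      = specDp m n cols i (j+1) := by
  obtain ⟨ii, rfl⟩ : ∃ ii : Nat, i = (ii:Int) := ⟨i.toNat, (Int.toNat_of_nonneg (by omega)).symm⟩
  obtain ⟨jj, rfl⟩ : ∃ jj : Nat, j = (jj:Int) := ⟨j.toNat, (Int.toNat_of_nonneg (by omega)).symm⟩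
  simp only [PySem.List.pySetD_natCast, PySem.List.pyGetD_natCast, Int.toNat_natCast]
  unfold specDp
  have hrow : ∀ (F : Nat → List Int), (List.map F (List.range n)).getD ii [] = F ii := by
    intro F
    rw [List.getD_eq_getElem _ _ (by simpa using hin)]
    simp
  rw [hrow]
  apply List.ext_getElem (by simp)
  intro r h1 h2
  have hr : r < n := by simpa using h1
  rw [List.getElem_set]
  simp only [List.getElem_map, List.getElem_range]
  split_ifs with hri
  · subst hri
    apply List.ext_getElem (by simp)
    intro c hc1 hc2
    have hc : c < cols := by simpa using hc1
    rw [List.getElem_set]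
    simp only [List.getElem_map, List.getElem_range, lt_self_iff_false, false_or, true_and]
    by_cases hcj : jj = c
    · subst hcj
      rw [if_pos rfl]
      split_ifs with h2
      · rfl
      · exfalso; omega
    · rw [if_neg hcj]
      split_ifs with hA hB hB
      · rfl
      · exfalso; omega
      · exfalso; omega
      · rfl
  · apply List.ext_getElem (by simp)
    intro c hc1 hc2
    simp only [List.getElem_map, List.getElem_range]
    split_ifs with hA hB hB
    · rfl
    · exfalso; omega
    · exfalso; omega
    · rfl

theorem max_eq_if_lt (a b : Int) : (if a < b then b else a) = max a b := by
  by_cases h : a < b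
  · rw [if_pos h, max_eq_right (by omega : a ≤ b)]
  · rw [if_neg h, max_eq_left (by omega : b ≤ a)]

theorem rows_eq (m : List (List Int)) (n cols : Nat) (hc : 1 ≤ cols) :
    ∀ (q r : Int), 1 ≤ r →
      (PySem.List.pyRange q (n:Int) 1).foldl
        (fun r i => (PySem.List.pyRange 0 (cols:Int) 1).foldl
          (fun r x => max r (val m i.toNat x.toNat)) r) r
      = (PySem.List.pyRange q (n:Int) 1).foldl
        (fun r i => (PySem.List.pyRange 1 (cols:Int) 1).foldl
          (fun r x => max r (val m i.toNat x.toNat)) r) r := by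
  intro q r hr
  induction hk : ((n:Int) - q).toNat generalizing q r with
  | zero =>
    rw [show PySem.List.pyRange q (n:Int) 1 = [] from PySem.List.pyRange_one_eq_nil (by omega)]
    rfl
  | succ t ih =>
    rw [show PySem.List.pyRange q (n:Int) 1 = q :: PySem.List.pyRange (q+1) (n:Int) 1 from
      PySem.List.pyRange_one_cons (by omega)]
    simp only [List.foldl_cons]
    have hinner : (PySem.List.pyRange 0 (cols:Int) 1).foldl
        (fun r x => max r (val m q.toNat x.toNat)) r
        = (PySem.List.pyRange 1 (cols:Int) 1).foldl
          (fun r x => max r (val m q.toNat x.toNat)) r := by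
      rw [show PySem.List.pyRange 0 (cols:Int) 1 = 0 :: PySem.List.pyRange 1 (cols:Int) 1 from
        PySem.List.pyRange_one_cons (by omega)]
      simp only [List.foldl_cons]
      have hz : max r (val m q.toNat (0:Int).toNat) = r := by
        rw [show ((0:Int)).toNat = 0 from rfl, val_zero_right]
        exact max_eq_left hr
      rw [hz]
    rw [hinner]
    exact ih (q+1) _ (le_trans hr (le_foldl_maxV _ _ r)) (by omega)

-- ===== VERDICT (by name: the statement is the Claim_ definition above) =====
theorem max_01_matrix_spec : Claim_equal_max_01_matrix := by
  unfold Claim_equal_max_01_matrix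
  intro matrix _ _
  unfold Spec_max_01_matrix
  unfold max_01_matrix max_01_matrix_alt
  by_cases h0 : matrix.length = 0 ∨ (PySem.List.pyGetD matrix 0 []).length = 0
  · rw [if_pos h0, if_pos h0]
  · rw [if_neg h0, if_neg h0]
    push Not at h0
    obtain ⟨hn0, hc0⟩ := h0
    set n := matrix.length with hn
    set cols := (PySem.List.pyGetD matrix 0 []).length with hcols
    have hn1 : 1 ≤ n := Nat.pos_of_ne_zero hn0
    have hc1 : 1 ≤ cols := Nat.pos_of_ne_zero hc0
    simp only [PySem.List.len_eq, List.length_replicate]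
    rw [specDp_init matrix n cols]
    rw [foldl_table _ (fun i => specDp matrix n cols i 1)
        (fun i r => (PySem.List.pyRange 1 (cols:Int) 1).foldl
          (fun r x => max r (val matrix i.toNat x.toNat)) r)
        1 (n:Int) ?hstep ?hG 1 1 le_rfl (by omega) le_rfl]
    case hG =>
      intro q r hq1 hq2 hr
      exact le_trans hr (le_foldl_maxV _ _ r)
    case hstep =>
      intro i r hi1 hi2 hr1
      simp only
      rw [row_len_specDp matrix n cols i 1 (by omega)]
      have hfold : ∀ p q : Int,
          (mget matrix p q == mget matrix (p-1) (q-1)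
            && !(mget matrix p q == mget matrix (p-1) q)
            && !(mget matrix p q == mget matrix p (q-1))) = okB matrix p q := fun _ _ => rfl
      rw [foldl_table _ (fun j => specDp matrix n cols i j)
          (fun q r => max r (val matrix i.toNat q.toNat)) 1 (cols:Int)
          ?istep ?iG 1 r le_rfl (by omega) hr1]
      case iG =>
        intro q r' hq1 hq2 hr'
        exact le_trans hr' (le_max_left _ _)
      case istep =>
        intro q r' hq1 hq2 hr'
        simp only
        rw [hfold i q]
        by_cases hok : okB matrix i q = true
        · rw [if_pos hok]
          have hm1 : mget (specDp matrix n cols i q) (i-1) (q-1)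
              = val matrix (i-1).toNat (q-1).toNat := by
            rw [mget_specDp matrix n cols i q (i-1) (q-1) (by omega) (by omega) (by omega) (by omega)]
            rw [if_pos (Or.inl (by omega))]
          have hm2 : mget (specDp matrix n cols i q) (i-1) q
              = val matrix (i-1).toNat q.toNat := by
            rw [mget_specDp matrix n cols i q (i-1) q (by omega) (by omega) (by omega) (by omega)]
            rw [if_pos (Or.inl (by omega))]
          have hm3 : mget (specDp matrix n cols i q) i (q-1)
              = val matrix i.toNat (q-1).toNat := by
            rw [mget_specDp matrix n cols i q i (q-1) (by omega) (by omega) (by omega) (by omega)]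
            rw [if_pos (Or.inr ⟨rfl, by omega⟩)]
          rw [hm1, hm2, hm3]
          rw [← val_succ_ok matrix i q hi1 hq1 hok]
          rw [specDp_update matrix n cols i q hi1 (by omega) hq1 (by omega)]
        · rw [if_neg hok]
          rw [specDp_skip matrix n cols i q hi1 hq1 hok]
          rw [val_succ_notok matrix i q hi1 hq1 hok, max_eq_left hr']
      rw [specDp_shift]
    -- both sides are now pure max-folds over val
    rw [PySem.List.foldl_congr_mem (PySem.List.pyRange 0 (n:Int) 1) _
        (fun best i => (PySem.List.pyRange 0 (cols:Int) 1).foldl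
          (fun r x => max r (val matrix i.toNat x.toNat)) best) 1
        (fun best i hi => by
          rw [PySem.List.mem_pyRange_one] at hi
          exact PySem.List.foldl_congr_mem (PySem.List.pyRange 0 (cols:Int) 1) _ _ best
            (fun acc q hq => by
              rw [PySem.List.mem_pyRange_one] at hq
              rw [grow_eq_val matrix i q (by omega) (by omega), max_eq_if_lt]))]
    rw [show PySem.List.pyRange 0 (n:Int) 1 = 0 :: PySem.List.pyRange 1 (n:Int) 1 from
      PySem.List.pyRange_one_cons (by omega)]
    simp only [List.foldl_cons]
    rw [foldl_max_absorb _ _ 1 (fun x hx => by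
      rw [show ((0:Int)).toNat = 0 from rfl, val_zero_left])]
    rw [← rows_eq matrix n cols hc1 1 1 le_rfl]
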